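-- pv_equiv track=rewrite | github.com/xBalbinus/bccs1 | HW5/hw5_p5.py | largestSpace
-- ===== SOURCE A (Python) =====
-- def largestSpace(occupied_stalls, num_stalls):
--     occupied_stalls = sorted(occupied_stalls)
--     #Current number with largest distance
--     currentLargest = 0
--     #Current shortest distance counter
--     currentdistanceCounter = 0
--     newdistanceCounter = 0
--     for i in range(1, num_stalls+1):
--         for j in range(1, len(occupied_stalls)):
--             #Selecting range for distance comparison
--             if i >= occupied_stalls[j-1] and i <= occupied_stalls[j]:
--                 #calculate distance to each endpoint
--                 if (i - occupied_stalls[j-1]) > abs(i - occupied_stalls[j]):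
--                     newdistanceCounter = abs(i - occupied_stalls[j])
--                     #set currentLargest to one with the largest newDistance.
--                     #set currentDistance to newdistance.
--                     if currentdistanceCounter <= newdistanceCounter:
--                         currentLargest = i
--                         currentdistanceCounter = newdistanceCounter
--                 elif i - occupied_stalls[j-1] < abs(i - occupied_stalls[j]):
--                     newdistanceCounter = i - occupied_stalls[j-1]
--                     if currentdistanceCounter <= newdistanceCounter:
--                         currentLargest = i
--                         currentdistanceCounter = newdistanceCounter
--                 elif i - occupied_stalls[j-1] == abs(i - occupied_stalls[j]):
--                     newdistanceCounter = i - occupied_stalls[j-1]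
--                     if currentdistanceCounter <= newdistanceCounter:
--                         currentLargest = i
--                         currentdistanceCounter = newdistanceCounter
--         if i > occupied_stalls[len(occupied_stalls) - 1] and i <= num_stalls:
--             #set newdistance to counter against max of list
--             newdistanceCounter = (i - occupied_stalls[len(occupied_stalls) - 1])
--             if currentdistanceCounter <= newdistanceCounter:
--                 currentLargest = i
--                 currentdistanceCounter = newdistanceCounter
--     return(currentLargest)
-- ===== SOURCE B (Python) =====
-- def largestSpace(occupied_stalls, num_stalls):
--     s = sorted(occupied_stalls)
--     k = len(s)
--     best_pos = best_dist = 0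
--     ptr = 0  # number of sorted stalls known to be < current position i
--     for i in range(1, num_stalls + 1):
--         while ptr < k and s[ptr] < i:
--             ptr += 1
--         if ptr == k:
--             d = i - s[k - 1]
--         elif k >= 2 and s[0] <= i:
--             d = 0 if s[ptr] == i else min(i - s[ptr - 1], s[ptr] - i)
--         else:
--             continue
--         if best_dist <= d:
--             best_pos, best_dist = i, d
--     return best_pos
-- ===== Notes on version B (the rewrite author's own statement) =====
-- stated objective: faster
-- what changed: A rescans every adjacent pair of the sorted stalls for each of the num_stalls candidate positions; B keeps a single monotone pointer into the sorted stalls (two-pointer sweep), so the inner scan disappears and each position is classified in amortized O(1).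
-- outside the precondition, e.g. on largestSpace([], 3): A raises IndexError, B raises IndexError
import Mathlib
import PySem

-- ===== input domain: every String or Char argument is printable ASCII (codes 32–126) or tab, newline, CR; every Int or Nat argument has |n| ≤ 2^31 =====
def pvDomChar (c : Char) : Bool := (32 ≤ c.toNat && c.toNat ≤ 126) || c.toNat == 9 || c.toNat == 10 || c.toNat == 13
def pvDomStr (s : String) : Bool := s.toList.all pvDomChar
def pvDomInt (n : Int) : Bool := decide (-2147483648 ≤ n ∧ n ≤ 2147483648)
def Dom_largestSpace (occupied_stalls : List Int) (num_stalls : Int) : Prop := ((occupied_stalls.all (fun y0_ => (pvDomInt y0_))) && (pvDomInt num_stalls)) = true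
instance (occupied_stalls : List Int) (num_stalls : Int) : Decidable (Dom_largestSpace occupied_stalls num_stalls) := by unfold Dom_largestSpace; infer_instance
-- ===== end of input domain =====

-- B replaces A's inner scan over all adjacent stall pairs for every position by a single
-- monotone pointer into the sorted stalls (two-pointer scan): O(n*k) -> O(n + k log k).

-- ===== PORT A =====
-- inner loop over j = 1 .. len(s)-1 for a fixed position i; state = (currentLargest, currentdistanceCounter, newdistanceCounter)
def aInner (s : List Int) (i : Int) (st : Int × Int × Int) : Int × Int × Int :=
  (PySem.List.pyRange 1 (s.length : Int) 1).foldl (fun st j =>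
    let a := PySem.List.pyGetD s (j - 1) 0
    let b := PySem.List.pyGetD s j 0
    if a ≤ i ∧ i ≤ b then
      if (i - a) > |i - b| then
        if st.2.1 ≤ |i - b| then (i, |i - b|, |i - b|) else (st.1, st.2.1, |i - b|)
      else if (i - a) < |i - b| then
        if st.2.1 ≤ i - a then (i, i - a, i - a) else (st.1, st.2.1, i - a)
      else if (i - a) = |i - b| then
        if st.2.1 ≤ i - a then (i, i - a, i - a) else (st.1, st.2.1, i - a)
      else st
    else st) st

-- one iteration of A's outer loop: inner loop, then the beyond-the-last-stall branch
def aStep (s : List Int) (num_stalls : Int) (st : Int × Int × Int) (i : Int) : Int × Int × Int :=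
  let st2 := aInner s i st
  let last := PySem.List.pyGetD s ((s.length : Int) - 1) 0
  if last < i ∧ i ≤ num_stalls then
    if st2.2.1 ≤ i - last then (i, i - last, i - last) else (st2.1, st2.2.1, i - last)
  else st2

def largestSpace (occupied_stalls : List Int) (num_stalls : Int) : Int :=
  let s := PySem.List.sorted occupied_stalls (fun x => x) false
  ((PySem.List.pyRange 1 (num_stalls + 1) 1).foldl (aStep s num_stalls) (0, 0, 0)).1

-- ===== PORT B =====
-- the 'while ptr < k and s[ptr] < i: ptr += 1' loop of Source B
def bWhile (s : List Int) (i : Int) (ptr : Nat) : Nat :=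
  if h : ptr < s.length then
    if s[ptr] < i then bWhile s i (ptr + 1) else ptr
  else ptr
termination_by s.length - ptr

-- one iteration of Source B's loop; state = (best_pos, best_dist, ptr)
def bStep (s : List Int) (st : Int × Int × Nat) (i : Int) : Int × Int × Nat :=
  let ptr := bWhile s i st.2.2
  if ptr = s.length then
    let d := i - s.getD (s.length - 1) 0
    if st.2.1 ≤ d then (i, d, ptr) else (st.1, st.2.1, ptr)
  else if 2 ≤ s.length ∧ s.getD 0 0 ≤ i then
    let sp := s.getD ptr 0
    let d := if sp = i then 0 else min (i - s.getD (ptr - 1) 0) (sp - i)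
    if st.2.1 ≤ d then (i, d, ptr) else (st.1, st.2.1, ptr)
  else (st.1, st.2.1, ptr)

def largestSpace_alt (occupied_stalls : List Int) (num_stalls : Int) : Int :=
  let s := PySem.List.sorted occupied_stalls (fun x => x) false
  ((PySem.List.pyRange 1 (num_stalls + 1) 1).foldl (bStep s) (0, 0, 0)).1

-- ===== PRECONDITION & SPEC =====
-- Pre_ excludes empty occupied_stalls with num_stalls >= 1, where A raises IndexError (B raises there too).
def Pre_largestSpace (occupied_stalls : List Int) (num_stalls : Int) : Prop :=
  occupied_stalls ≠ [] ∨ num_stalls < 1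
instance (occupied_stalls : List Int) (num_stalls : Int) : Decidable (Pre_largestSpace occupied_stalls num_stalls) := by unfold Pre_largestSpace; infer_instance

def pvWitness_largestSpace : List Int × Int := ([2, 7], 9)

def Spec_largestSpace (occupied_stalls : List Int) (num_stalls : Int) (out : Int) : Prop := out = largestSpace_alt occupied_stalls num_stalls
instance (occupied_stalls : List Int) (num_stalls : Int) (out : Int) : Decidable (Spec_largestSpace occupied_stalls num_stalls out) := by unfold Spec_largestSpace; infer_instance

-- ===== CLAIM (what is proved, stated in full; the proofs are below) =====
def Claim_equal_largestSpace : Prop := ∀ (occupied_stalls : List Int) (num_stalls : Int), Dom_largestSpace occupied_stalls num_stalls → Pre_largestSpace occupied_stalls num_stalls → Spec_largestSpace occupied_stalls num_stalls (largestSpace occupied_stalls num_stalls)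

-- ===== LEMMAS AND PROOFS =====

-- number of list entries (a prefix, once the list is sorted) strictly below i
def cnt (s : List Int) (i : Int) : Nat :=
  match s with
  | [] => 0
  | x :: t => if x < i then cnt t i + 1 else 0

lemma cnt_le (s : List Int) (i : Int) : cnt s i ≤ s.length := by
  induction s with
  | nil => simp [cnt]
  | cons x t ih => simp only [cnt]; split <;> simp; omega

lemma cnt_lt (s : List Int) (i : Int) : ∀ idx, idx < cnt s i → s.getD idx 0 < i := by
  induction s with
  | nil => simp [cnt]
  | cons x t ih =>
    intro idx h
    simp only [cnt] at h
    split at h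
    · cases idx with
      | zero => simpa
      | succ m => simpa using ih m (by omega)
    · omega

lemma cnt_ge (s : List Int) (i : Int) (h : cnt s i < s.length) : i ≤ s.getD (cnt s i) 0 := by
  induction s with
  | nil => simp at h
  | cons x t ih =>
    simp only [cnt] at h ⊢
    split at h
    · rename_i hx
      simp only [if_pos hx, List.getD_cons_succ]
      simp only [List.length_cons] at h
      exact ih (by omega)
    · rename_i hx
      simp only [if_neg hx, List.getD_cons_zero]
      omega

-- the unique characterisation: anything with cnt's three properties equals cnt
lemma cnt_unique (s : List Int) (i : Int) (r : Nat) (hle : r ≤ s.length)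
    (hlt : ∀ idx, idx < r → s.getD idx 0 < i) (hge : r < s.length → i ≤ s.getD r 0) :
    r = cnt s i := by
  by_contra hne
  rcases Nat.lt_or_ge r (cnt s i) with h | h
  · have h1 := hge (lt_of_lt_of_le h (cnt_le s i))
    have h2 := cnt_lt s i r h
    omega
  · have h' : cnt s i < r := by omega
    have h1 := hlt (cnt s i) h'
    have h2 := cnt_ge s i (lt_of_lt_of_le h' hle)
    omega

lemma bWhile_eq_cnt (s : List Int) (i : Int) :
    ∀ fuel ptr, s.length - ptr ≤ fuel → ptr ≤ s.length →
    (∀ idx, idx < ptr → s.getD idx 0 < i) → bWhile s i ptr = cnt s i := by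
  intro fuel
  induction fuel with
  | zero =>
    intro ptr hf hle hlt
    have hptr : ptr = s.length := by omega
    rw [bWhile]
    simp only [hptr, lt_irrefl, dite_false]
    exact cnt_unique s i s.length le_rfl (by intro idx h; exact hlt idx (by omega)) (by omega)
  | succ n ih =>
    intro ptr hf hle hlt
    rw [bWhile]
    by_cases h : ptr < s.length
    · simp only [h, dite_true]
      by_cases h2 : s[ptr] < i
      · simp only [h2, if_true]
        apply ih (ptr + 1) (by omega) (by omega)
        intro idx hidx
        rcases Nat.lt_or_ge idx ptr with h3 | h3
        · exact hlt idx h3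
        · have : idx = ptr := by omega
          subst this
          simpa [List.getD_eq_getElem?_getD, List.getElem?_eq_getElem h] using h2
      · simp only [h2, if_false]
        apply cnt_unique s i ptr (by omega) hlt
        intro _
        have : s.getD ptr 0 = s[ptr] := by
          simp [List.getD_eq_getElem?_getD, List.getElem?_eq_getElem h]
        omega
    · simp only [h, dite_false]
      have hptr : ptr = s.length := by omega
      subst hptr
      exact cnt_unique s i s.length le_rfl hlt (by omega)

-- sortedness at the level of getD
lemma sorted_getD {s : List Int} (hs : s.Pairwise (· ≤ ·)) {idx idx' : Nat}
    (h1 : idx ≤ idx') (h2 : idx' < s.length) : s.getD idx 0 ≤ s.getD idx' 0 := by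
  rcases Nat.eq_or_lt_of_le h1 with rfl | hlt
  · exact le_refl _
  · have := (List.pairwise_iff_getElem.mp hs) idx idx' (by omega) h2 hlt
    simpa [List.getD_eq_getElem?_getD, List.getElem?_eq_getElem (by omega : idx < s.length),
      List.getElem?_eq_getElem h2] using this

-- the conditional update both programs perform when position i has candidate distance d
def condUpd (i d : Int) (st : Int × Int × Int) : Int × Int × Int :=
  if st.2.1 ≤ d then (i, d, d) else (st.1, st.2.1, d)

lemma condUpd_idem (i d : Int) (st : Int × Int × Int) : condUpd i d (condUpd i d st) = condUpd i d st := by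
  simp only [condUpd]
  split <;> simp_all

lemma foldl_cond_const {β : Type} (l : List β) (P : β → Prop) [DecidablePred P]
    (f : Int × Int × Int → Int × Int × Int) (st : Int × Int × Int) (hfix : f st = st) :
    l.foldl (fun st j => if P j then f st else st) st = st := by
  induction l generalizing st with
  | nil => rfl
  | cons x t ih =>
    simp only [List.foldl_cons]
    split
    · rw [hfix]; exact ih st hfix
    · exact ih st hfix

lemma foldl_cond_of_ex {β : Type} (l : List β) (P : β → Prop) [DecidablePred P]
    (f : Int × Int × Int → Int × Int × Int) (hidem : ∀ st, f (f st) = f st) (st : Int × Int × Int)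
    (hex : ∃ j ∈ l, P j) :
    l.foldl (fun st j => if P j then f st else st) st = f st := by
  induction l generalizing st with
  | nil => simp at hex
  | cons x t ih =>
    simp only [List.foldl_cons]
    by_cases h : P x
    · simp only [if_pos h]
      exact foldl_cond_const t P f (f st) (hidem st)
    · simp only [if_neg h]
      rcases hex with ⟨j, hj, hPj⟩
      rcases List.mem_cons.mp hj with rfl | hjt
      · exact absurd hPj h
      · exact ih st ⟨j, hjt, hPj⟩

-- candidate distance at position i (meaningful when it exists; c = cnt s i)
def dval (s : List Int) (i : Int) : Int :=
  let c := cnt s i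
  if c = s.length then i - s.getD (s.length - 1) 0
  else if s.getD c 0 = i then 0
  else min (i - s.getD (c - 1) 0) (s.getD c 0 - i)

lemma foldl_eq_self {α β : Type} (l : List β) (body : α → β → α) (st : α)
    (h : ∀ st j, j ∈ l → body st j = st) : l.foldl body st = st := by
  induction l generalizing st with
  | nil => rfl
  | cons x t ih =>
    simp only [List.foldl_cons, h st x (by simp)]
    exact ih st (fun st j hj => h st j (by simp [hj]))

-- A's three-way branch, on a bracketing pair, is the conditional update with the min distance
lemma chain_eq (i a b : Int) (_ha : a ≤ i) (hb : i ≤ b) (st : Int × Int × Int) :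
    (if (i - a) > |i - b| then
        if st.2.1 ≤ |i - b| then (i, |i - b|, |i - b|) else (st.1, st.2.1, |i - b|)
      else if (i - a) < |i - b| then
        if st.2.1 ≤ i - a then (i, i - a, i - a) else (st.1, st.2.1, i - a)
      else if (i - a) = |i - b| then
        if st.2.1 ≤ i - a then (i, i - a, i - a) else (st.1, st.2.1, i - a)
      else st) = condUpd i (min (i - a) (b - i)) st := by
  have habs : |i - b| = b - i := by rw [abs_sub_comm]; exact abs_of_nonneg (by omega)
  rw [habs]
  rcases lt_trichotomy (i - a) (b - i) with h | h | h
  · rw [if_neg (by omega), if_pos h, min_eq_left (by omega)]; rfl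
  · rw [if_neg (by omega), if_neg (by omega), if_pos h, min_eq_left (by omega)]; rfl
  · rw [if_pos h, min_eq_right (by omega)]; rfl

-- the min distance of any bracketing pair equals dval
lemma matchVal (s : List Int) (i : Int) (hs : s.Pairwise (· ≤ ·)) (jn : Nat)
    (h1 : 1 ≤ jn) (h2 : jn < s.length) (ha : s.getD (jn - 1) 0 ≤ i) (hb : i ≤ s.getD jn 0)
    (hc : cnt s i < s.length) :
    min (i - s.getD (jn - 1) 0) (s.getD jn 0 - i) = dval s i := by
  have hge : i ≤ s.getD (cnt s i) 0 := cnt_ge s i hc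
  have hjc : cnt s i ≤ jn := by
    by_contra hlt
    have := cnt_lt s i jn (by omega)
    omega
  unfold dval
  rw [if_neg (by omega)]
  by_cases hci : s.getD (cnt s i) 0 = i
  · rw [if_pos hci]
    by_cases hj1 : cnt s i ≤ jn - 1
    · have hax : s.getD (cnt s i) 0 ≤ s.getD (jn - 1) 0 := sorted_getD hs hj1 (by omega)
      have hai : s.getD (jn - 1) 0 = i := by omega
      rw [hai]
      omega
    · have hjeq : jn = cnt s i := by omega
      have hbi : s.getD jn 0 = i := by rw [hjeq, hci]
      rw [hbi]
      omega
  · rw [if_neg hci]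
    have hgt : i < s.getD (cnt s i) 0 := by omega
    have hj1 : jn - 1 < cnt s i := by
      by_contra hge1
      have : s.getD (cnt s i) 0 ≤ s.getD (jn - 1) 0 := sorted_getD hs (by omega) (by omega)
      omega
    have hjeq : jn = cnt s i := by omega
    rw [hjeq]

-- A's inner loop equals: a single conditional update when a bracketing pair exists, else the identity
lemma aInner_eq (s : List Int) (i : Int) (hs : s.Pairwise (· ≤ ·)) (st : Int × Int × Int) :
    aInner s i st =
      if cnt s i < s.length ∧ 2 ≤ s.length ∧ s.getD 0 0 ≤ i then condUpd i (dval s i) st else st := by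
  by_cases hcond : cnt s i < s.length ∧ 2 ≤ s.length ∧ s.getD 0 0 ≤ i
  · rw [if_pos hcond]
    obtain ⟨hclen, hlen2, h0le⟩ := hcond
    unfold aInner
    refine Eq.trans (PySem.List.foldl_congr_mem _ _
      (fun st j => if PySem.List.pyGetD s (j - 1) 0 ≤ i ∧ i ≤ PySem.List.pyGetD s j 0 then
              condUpd i (dval s i) st else st) st
      (by
        intro st' j hj
        obtain ⟨hj1, hj2⟩ := (PySem.List.mem_pyRange_one).mp hj
        have hjn : j = ((j.toNat : Nat) : Int) := by omega
        have hjm : j - 1 = (((j.toNat - 1 : Nat) : Nat) : Int) := by omega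
        have ea : PySem.List.pyGetD s (j - 1) 0 = s.getD (j.toNat - 1) 0 := by
          conv_lhs => rw [hjm]
          simp
        have eb : PySem.List.pyGetD s j 0 = s.getD j.toNat 0 := by
          conv_lhs => rw [hjn]
          rw [PySem.List.pyGetD_natCast]
        dsimp only
        by_cases hP : PySem.List.pyGetD s (j - 1) 0 ≤ i ∧ i ≤ PySem.List.pyGetD s j 0
        · have hPa := ea ▸ hP.1
          have hPb := eb ▸ hP.2
          rw [ea, eb, if_pos (And.intro hPa hPb), chain_eq i _ _ hPa hPb,
            matchVal s i hs j.toNat (by omega) (by omega) hPa hPb hclen,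
            if_pos (And.intro hPa hPb)]
        · rw [if_neg hP, if_neg hP])) ?_
    apply foldl_cond_of_ex _ _ _ (condUpd_idem i (dval s i))
    -- a bracketing pair exists
    by_cases hc0 : cnt s i = 0
    · refine ⟨1, PySem.List.mem_pyRange_one.mpr (by omega), ?_⟩
      have hge := cnt_ge s i hclen
      rw [hc0] at hge
      have h0i : s.getD 0 0 = i := by omega
      constructor
      · show PySem.List.pyGetD s 0 0 ≤ i
        rw [(by norm_num : (0 : Int) = ((0 : Nat) : Int)), PySem.List.pyGetD_natCast]
        omega
      · show i ≤ PySem.List.pyGetD s 1 0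
        rw [(by norm_num : (1 : Int) = ((1 : Nat) : Int)), PySem.List.pyGetD_natCast]
        have : s.getD 0 0 ≤ s.getD 1 0 := sorted_getD hs (by omega) (by omega)
        omega
    · refine ⟨(cnt s i : Int), PySem.List.mem_pyRange_one.mpr (by omega), ?_⟩
      constructor
      · show PySem.List.pyGetD s ((cnt s i : Int) - 1) 0 ≤ i
        rw [(by omega : ((cnt s i : Int) - 1) = ((cnt s i - 1 : Nat) : Int)),
          PySem.List.pyGetD_natCast]
        have := cnt_lt s i (cnt s i - 1) (by omega)
        omega
      · show i ≤ PySem.List.pyGetD s (cnt s i : Int) 0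
        rw [PySem.List.pyGetD_natCast]
        exact cnt_ge s i hclen
  · rw [if_neg hcond]
    unfold aInner
    apply foldl_eq_self
    intro st' j hj
    obtain ⟨hj1, hj2⟩ := (PySem.List.mem_pyRange_one).mp hj
    apply if_neg
    rintro ⟨hPa, hPb⟩
    rw [(by omega : j - 1 = ((j.toNat - 1 : Nat) : Int)), PySem.List.pyGetD_natCast] at hPa
    rw [(by omega : j = ((j.toNat : Nat) : Int)), PySem.List.pyGetD_natCast] at hPb
    have hlen2 : 2 ≤ s.length := by omega
    rcases not_and_or.mp hcond with h | h
    · -- cnt = length: every right endpoint is below i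
      have : j.toNat < cnt s i := by
        have := cnt_le s i
        omega
      have := cnt_lt s i j.toNat this
      omega
    · rcases not_and_or.mp h with h | h
      · omega
      · -- i below the first stall: every left endpoint is above i
        have : s.getD 0 0 ≤ s.getD (j.toNat - 1) 0 := sorted_getD hs (by omega) (by omega)
        omega

-- A's one outer iteration equals B's one iteration, on related states
lemma step_rel (s : List Int) (n : Int) (hs : s.Pairwise (· ≤ ·)) (hk : s ≠ [])
    (i : Int) (hin : i ≤ n) (stA : Int × Int × Int) (stB : Int × Int × Nat)
    (h1 : stA.1 = stB.1) (h2 : stA.2.1 = stB.2.1)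
    (hptr : stB.2.2 ≤ s.length ∧ ∀ idx, idx < stB.2.2 → s.getD idx 0 < i) :
    (aStep s n stA i).1 = (bStep s stB i).1 ∧ (aStep s n stA i).2.1 = (bStep s stB i).2.1 ∧
      (bStep s stB i).2.2 = cnt s i := by
  have hlen : 1 ≤ s.length := by
    cases s with
    | nil => exact absurd rfl hk
    | cons x t => simp
  have hw : bWhile s i stB.2.2 = cnt s i :=
    bWhile_eq_cnt s i s.length stB.2.2 (by omega) hptr.1 hptr.2
  unfold aStep bStep
  rw [hw, aInner_eq s i hs]
  have elast : PySem.List.pyGetD s ((s.length : Int) - 1) 0 = s.getD (s.length - 1) 0 := by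
    rw [(by omega : ((s.length : Int) - 1) = ((s.length - 1 : Nat) : Int)),
      PySem.List.pyGetD_natCast]
  rw [elast]
  dsimp only
  by_cases hck : cnt s i = s.length
  · -- position i lies beyond every stall
    have hlast : s.getD (s.length - 1) 0 < i := cnt_lt s i (s.length - 1) (by omega)
    have hA : ¬ (cnt s i < s.length ∧ 2 ≤ s.length ∧ s.getD 0 0 ≤ i) := by
      rintro ⟨h, -⟩; omega
    simp only [if_neg hA, if_pos hck, if_pos (And.intro hlast hin)]
    rw [h2]
    split <;> simp [h1]
  · have hcl : cnt s i < s.length := lt_of_le_of_ne (cnt_le s i) hck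
    have hmax : i ≤ s.getD (s.length - 1) 0 :=
      le_trans (cnt_ge s i hcl) (sorted_getD hs (by omega) (by omega))
    have hedge : ¬ (s.getD (s.length - 1) 0 < i ∧ i ≤ n) := by rintro ⟨h, -⟩; omega
    simp only [if_neg hck, if_neg hedge]
    by_cases hcond : 2 ≤ s.length ∧ s.getD 0 0 ≤ i
    · simp only [if_pos (And.intro hcl (And.intro hcond.1 hcond.2)), if_pos hcond]
      have hd : dval s i =
          if s.getD (cnt s i) 0 = i then 0
          else min (i - s.getD (cnt s i - 1) 0) (s.getD (cnt s i) 0 - i) := by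
        unfold dval
        rw [if_neg hck]
      unfold condUpd
      rw [h2, ← hd]
      split <;> simp [h1]
    · have hA : ¬ (cnt s i < s.length ∧ 2 ≤ s.length ∧ s.getD 0 0 ≤ i) := by tauto
      simp only [if_neg hA, if_neg hcond]
      simp [h1, h2]

lemma main_fold (s : List Int) (n : Int) (hs : s.Pairwise (· ≤ ·)) (hk : s ≠ []) :
    ∀ fuel (a : Int) (stA : Int × Int × Int) (stB : Int × Int × Nat),
      (n + 1 - a).toNat ≤ fuel →
      stA.1 = stB.1 → stA.2.1 = stB.2.1 →
      stB.2.2 ≤ s.length → (∀ idx, idx < stB.2.2 → s.getD idx 0 < a) →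
      ((PySem.List.pyRange a (n + 1) 1).foldl (aStep s n) stA).1 =
      ((PySem.List.pyRange a (n + 1) 1).foldl (bStep s) stB).1 := by
  intro fuel
  induction fuel with
  | zero =>
    intro a stA stB hf h1 h2 hle hlt
    rw [PySem.List.pyRange_one_eq_nil (by omega)]
    exact h1
  | succ m ih =>
    intro a stA stB hf h1 h2 hle hlt
    by_cases ha : a < n + 1
    · rw [PySem.List.pyRange_one_cons ha]
      simp only [List.foldl_cons]
      obtain ⟨e1, e2, e3⟩ := step_rel s n hs hk a (by omega) stA stB h1 h2
        ⟨hle, fun idx h => hlt idx h⟩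
      apply ih (a + 1) _ _ (by omega) e1 e2
      · rw [e3]; exact cnt_le s a
      · intro idx hidx
        rw [e3] at hidx
        have := cnt_lt s a idx hidx
        omega
    · rw [PySem.List.pyRange_one_eq_nil (by omega)]
      exact h1

-- ===== VERDICT (by name: the statement is the Claim_ definition above) =====
theorem largestSpace_spec : Claim_equal_largestSpace := by
  intro occ n _ hpre
  unfold Spec_largestSpace largestSpace largestSpace_alt
  set s := PySem.List.sorted occ (fun x => x) false with hsdef
  by_cases hn : n < 1
  · rw [PySem.List.pyRange_one_eq_nil (by omega)]; rfl
  · have hne : s ≠ [] := by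
      rcases hpre with h | h
      · intro hnil
        have := PySem.List.sorted_perm occ (fun x : Int => x) false
        rw [← hsdef, hnil] at this
        exact h (this.symm.eq_nil)
      · omega
    have hs : s.Pairwise (· ≤ ·) := by
      simpa using PySem.List.sorted_pairwise occ (fun x : Int => x)
    exact main_fold s n hs hne (n + 1 - 1).toNat 1 (0,0,0) (0,0,0) le_rfl rfl rfl
      (by simp) (by simp)
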